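-- pv_equiv track=rewrite | github.com/AmericanHowl/folio | folio.py | select_best_format_for_import
-- ===== SOURCE A (Python) =====
-- def select_best_format_for_import(filepaths):
--     """
--     Given a list of file paths for the same book (different formats),
--     select the best one for import. Prefers KEPUB, then EPUB (can be converted to KEPUB),
--     then other formats in order of preference.
--     Returns (best_file, other_files) tuple.
--     """
--     # Priority order: KEPUB (already converted) > EPUB (for KEPUB conversion) > MOBI > AZW3 > others
--     priority = {
--         '.kepub': 0,  # Already KEPUB is best
--         '.epub': 1,
--         '.mobi': 2,
--         '.azw3': 3,
--         '.azw': 4,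
--         '.pdf': 5,
--     }
--
--     def get_priority(filepath):
--         lower = filepath.lower()
--         # Check .kepub first (it won't match .epub check)
--         if lower.endswith('.kepub'):
--             return priority.get('.kepub', 99)
--         for ext, prio in priority.items():
--             if lower.endswith(ext):
--                 return prio
--         return 99
--
--     sorted_files = sorted(filepaths, key=get_priority)
--     return sorted_files[0], sorted_files[1:] if len(sorted_files) > 1 else []
-- ===== SOURCE B (Python) =====
-- def select_best_format_for_import(filepaths):
--     """
--     Given a list of file paths for the same book (different formats),
--     select the best one for import. Bucket selection instead of a comparison
--     sort: one filter pass per priority tier, concatenated in ascending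
--     priority order (stable because each pass keeps encounter order).
--     Returns (best_file, other_files) tuple.
--     """
--     def get_priority(filepath):
--         lower = filepath.lower()
--         if lower.endswith('.kepub'):
--             return 0
--         if lower.endswith('.epub'):
--             return 1
--         if lower.endswith('.mobi'):
--             return 2
--         if lower.endswith('.azw3'):
--             return 3
--         if lower.endswith('.azw'):
--             return 4
--         if lower.endswith('.pdf'):
--             return 5
--         return 99
--
--     flat = []
--     for p in (0, 1, 2, 3, 4, 5, 99):
--         flat.extend(f for f in filepaths if get_priority(f) == p)
--     return flat[0], flat[1:]
-- ===== Notes on version B (the rewrite author's own statement) =====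
-- stated objective: alternative
-- what changed: Replaces the stable comparison sort over a priority-key function with a bucket pass: one filter pass per priority tier (0..5, 99), concatenated in ascending tier order, which reproduces the stable sort; get_priority becomes a plain if-chain instead of a dict lookup loop.
import Mathlib
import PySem

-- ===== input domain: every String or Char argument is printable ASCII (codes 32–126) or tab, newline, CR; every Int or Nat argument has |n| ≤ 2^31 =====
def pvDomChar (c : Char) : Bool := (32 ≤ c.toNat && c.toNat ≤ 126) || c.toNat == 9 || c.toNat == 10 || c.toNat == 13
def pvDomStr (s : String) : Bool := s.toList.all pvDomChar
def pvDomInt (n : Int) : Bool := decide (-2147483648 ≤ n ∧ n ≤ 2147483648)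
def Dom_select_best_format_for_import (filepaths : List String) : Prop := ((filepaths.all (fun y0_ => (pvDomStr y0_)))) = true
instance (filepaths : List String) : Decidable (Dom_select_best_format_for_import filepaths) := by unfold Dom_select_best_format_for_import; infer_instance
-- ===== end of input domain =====

-- B replaces the stable comparison sort by a bucket pass (one filter per priority tier,
-- concatenated ascending), a different algorithm of similar cost ("alternative").


-- ===== PORT A =====
-- A's module-level 'priority' dict
def pvPriorityDict : PySem.Dict String Int :=
  PySem.Dict.ofList [(".kepub", 0), (".epub", 1), (".mobi", 2), (".azw3", 3), (".azw", 4), (".pdf", 5)]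

-- A's 'for ext, prio in priority.items(): if lower.endswith(ext): return prio' loop
def pvPrioLoopA (lower : String) : List (String × Int) → Int
  | [] => 99
  | (ext, prio) :: rest => if PySem.Str.endswith lower ext then prio else pvPrioLoopA lower rest

def pvGetPriorityA (filepath : String) : Int :=
  let lower := PySem.Str.lower filepath
  if PySem.Str.endswith lower ".kepub" then PySem.Dict.getD pvPriorityDict ".kepub" 99
  else pvPrioLoopA lower pvPriorityDict.items

def select_best_format_for_import (filepaths : List String) : String × List String :=
  let sorted_files := PySem.List.sorted filepaths pvGetPriorityA
  match PySem.List.pyGet? sorted_files 0 with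
  | none => ("", [])  -- IndexError on the empty list: excluded by Pre_
  | some best =>
      (best, if PySem.List.len sorted_files > 1 then PySem.List.slice sorted_files (some 1) none else [])

-- ===== PORT B =====
-- B's get_priority: a plain if-chain
def pvGetPriorityB (filepath : String) : Int :=
  let lower := PySem.Str.lower filepath
  if PySem.Str.endswith lower ".kepub" then 0
  else if PySem.Str.endswith lower ".epub" then 1
  else if PySem.Str.endswith lower ".mobi" then 2
  else if PySem.Str.endswith lower ".azw3" then 3
  else if PySem.Str.endswith lower ".azw" then 4
  else if PySem.Str.endswith lower ".pdf" then 5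
  else 99

def select_best_format_for_import_alt (filepaths : List String) : String × List String :=
  -- for p in (0,1,2,3,4,5,99): flat.extend(f for f in filepaths if get_priority(f) == p)
  let flat := [(0 : Int), 1, 2, 3, 4, 5, 99].flatMap
    (fun p => filepaths.filter (fun f => pvGetPriorityB f == p))
  match PySem.List.pyGet? flat 0 with
  | none => ("", [])  -- IndexError on the empty list: excluded by Pre_
  | some best => (best, PySem.List.slice flat (some 1) none)

-- ===== PRECONDITION & SPEC =====
-- A (and B) raise IndexError on the empty list; Pre_ excludes exactly that input.
def Pre_select_best_format_for_import (filepaths : List String) : Prop := filepaths ≠ []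
instance (filepaths : List String) : Decidable (Pre_select_best_format_for_import filepaths) := by
  unfold Pre_select_best_format_for_import; infer_instance
def pvWitness_select_best_format_for_import : List String := ["a.pdf", "b.epub"]

def Spec_select_best_format_for_import (filepaths : List String) (out : String × List String) : Prop := out = select_best_format_for_import_alt filepaths
instance (filepaths : List String) (out : String × List String) : Decidable (Spec_select_best_format_for_import filepaths out) := by unfold Spec_select_best_format_for_import; infer_instance

-- ===== CLAIM (what is proved, stated in full; the proofs are below) =====
def Claim_equal_select_best_format_for_import : Prop := ∀ (filepaths : List String), Dom_select_best_format_for_import filepaths → Pre_select_best_format_for_import filepaths → Spec_select_best_format_for_import filepaths (select_best_format_for_import filepaths)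

-- ===== LEMMAS AND PROOFS =====

-- the two get_priority implementations agree
theorem pv_prio_eq (f : String) : pvGetPriorityA f = pvGetPriorityB f := by
  have hitems : pvPriorityDict.items
      = [(".kepub", (0 : Int)), (".epub", 1), (".mobi", 2), (".azw3", 3), (".azw", 4), (".pdf", 5)] := by
    rfl
  have hget : PySem.Dict.getD pvPriorityDict ".kepub" 99 = 0 := by rfl
  simp only [pvGetPriorityA, pvGetPriorityB, hget, hitems, pvPrioLoopA]
  split_ifs <;> rfl

theorem pv_prio_mem (f : String) : pvGetPriorityB f ∈ ([0, 1, 2, 3, 4, 5, 99] : List Int) := by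
  simp only [pvGetPriorityB]
  split_ifs <;> simp

theorem pv_insertBy_append {α : Type} (bf : α → α → Bool) (x : α) (l1 l2 : List α)
    (h : ∀ y ∈ l1, bf x y = false) :
    PySem.List.insertBy bf x (l1 ++ l2) = l1 ++ PySem.List.insertBy bf x l2 := by
  induction l1 with
  | nil => simp
  | cons y ys ih =>
      simp only [List.cons_append, PySem.List.insertBy, h y (by simp)]
      simp only [Bool.false_eq_true, if_false, List.cons.injEq, true_and]
      exact ih (fun z hz => h z (by simp [hz]))

theorem pv_insertBy_all_before {α : Type} (bf : α → α → Bool) (x : α) (l : List α)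
    (h : ∀ y ∈ l, bf x y = true) :
    PySem.List.insertBy bf x l = x :: l := by
  cases l with
  | nil => rfl
  | cons y ys => simp [PySem.List.insertBy, h y (by simp)]

theorem pv_flat_congr {α : Type} (key : α → Int) (x : α) (xs : List α) (ks : List Int)
    (h : ∀ p ∈ ks, key x ≠ p) :
    ks.flatMap (fun p => (xs ++ [x]).filter (fun f => key f == p))
      = ks.flatMap (fun p => xs.filter (fun f => key f == p)) := by
  induction ks with
  | nil => rfl
  | cons p rest ih =>
      simp only [List.flatMap_cons]
      rw [ih (fun q hq => h q (by simp [hq]))]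
      have hp : key x ≠ p := h p (by simp)
      simp [List.filter_append, hp]

theorem pv_insertBy_flat {α : Type} (key : α → Int) (x : α) (ks : List Int) (xs : List α)
    (hks : ks.Pairwise (· < ·)) (hx : key x ∈ ks) :
    PySem.List.insertBy (fun a b => decide (key a < key b)) x
        (ks.flatMap (fun p => xs.filter (fun f => key f == p)))
      = ks.flatMap (fun p => (xs ++ [x]).filter (fun f => key f == p)) := by
  induction ks with
  | nil => simp at hx
  | cons p rest ih =>
      simp only [List.flatMap_cons]
      by_cases hxp : key x = p
      · -- x belongs to the head bucket: pass through it, then insert in front of the rest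
        rw [pv_insertBy_append _ x _ _ (by
          intro y hy
          have : key y = p := by simpa using (List.mem_filter.mp hy).2
          simp [this, hxp])]
        rw [pv_insertBy_all_before _ x _ (by
          intro y hy
          obtain ⟨q, hq, hyq⟩ := List.mem_flatMap.mp hy
          have hkyq : key y = q := by simpa using (List.mem_filter.mp hyq).2
          have : p < q := (List.pairwise_cons.mp hks).1 q hq
          simp [hkyq, hxp]
          omega)]
        have hrest : ∀ q ∈ rest, key x ≠ q := by
          intro q hq hxq
          have : p < q := (List.pairwise_cons.mp hks).1 q hq
          omega
        rw [pv_flat_congr key x xs rest hrest]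
        have : (xs ++ [x]).filter (fun f => key f == p) = xs.filter (fun f => key f == p) ++ [x] := by
          simp [List.filter_append, hxp]
        rw [this]
        simp
      · -- x belongs to a later bucket
        have hxr : key x ∈ rest := by
          rcases List.mem_cons.mp hx with h | h
          · exact absurd h hxp
          · exact h
        rw [pv_insertBy_append _ x _ _ (by
          intro y hy
          have hky : key y = p := by simpa using (List.mem_filter.mp hy).2
          have : p < key x := by
            rcases List.mem_cons.mp hx with h | h
            · exact absurd h hxp
            · exact (List.pairwise_cons.mp hks).1 _ h
          simp [hky]
          omega)]
        rw [ih (List.pairwise_cons.mp hks).2 hxr]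
        have : (xs ++ [x]).filter (fun f => key f == p) = xs.filter (fun f => key f == p) := by
          simp [List.filter_append, hxp]
        rw [this]

theorem pv_sorted_eq_flat {α : Type} (key : α → Int) (ks : List Int)
    (hks : ks.Pairwise (· < ·)) (hk : ∀ x : α, key x ∈ ks) (xs : List α) :
    PySem.List.sorted xs key = ks.flatMap (fun p => xs.filter (fun f => key f == p)) := by
  induction xs using List.reverseRecOn with
  | nil => simp [PySem.List.sorted_eq_foldl_insertBy]
  | append_singleton xs x ih =>
      rw [PySem.List.sorted_eq_foldl_insertBy, List.foldl_append,
          ← PySem.List.sorted_eq_foldl_insertBy]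
      simp only [List.foldl_cons, List.foldl_nil]
      rw [ih, pv_insertBy_flat key x ks xs hks (hk x)]

theorem pv_sorted_eq_flatB (xs : List String) :
    PySem.List.sorted xs pvGetPriorityA
      = [(0 : Int), 1, 2, 3, 4, 5, 99].flatMap
          (fun p => xs.filter (fun f => pvGetPriorityB f == p)) := by
  have h := pv_sorted_eq_flat pvGetPriorityA [(0 : Int), 1, 2, 3, 4, 5, 99]
    (by decide) (fun f => by rw [pv_prio_eq]; exact pv_prio_mem f) xs
  rw [h]
  simp only [pv_prio_eq]

-- ===== VERDICT (by name: the statement is the Claim_ definition above) =====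
theorem select_best_format_for_import_spec : Claim_equal_select_best_format_for_import := by
  intro xs _ hpre
  unfold Spec_select_best_format_for_import
  unfold select_best_format_for_import select_best_format_for_import_alt
  simp only [pv_sorted_eq_flatB]
  have hne : [(0 : Int), 1, 2, 3, 4, 5, 99].flatMap
      (fun p => xs.filter (fun f => pvGetPriorityB f == p)) ≠ [] := by
    rw [← pv_sorted_eq_flatB, Ne, PySem.List.sorted_eq_nil_iff]
    exact hpre
  obtain ⟨h, t, heq⟩ := List.exists_cons_of_ne_nil hne
  simp only [heq]
  have hget : PySem.List.pyGet? (h :: t) 0 = some h := by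
    simp [PySem.List.pyGet?, PySem.List.pyIdx?]
  have hslice : PySem.List.slice (h :: t) (some 1) = t := by
    rw [PySem.List.slice_from _ (by norm_num)]
    simp
  simp only [hget, hslice]
  cases t with
  | nil => simp [PySem.List.len]
  | cons y t' =>
      have hlt : (1 : Int) < PySem.List.len (h :: y :: t') := by
        simp only [PySem.List.len, List.length_cons]
        omega
      simp only [gt_iff_lt, if_pos hlt]
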